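-- pv_equiv track=rewrite | github.com/CypriumCuprum/PTIT_PYTHON | PY02061.py | cn
-- ===== SOURCE A (Python) =====
-- def cn(ma, kernel):
--     rs = 0
--     for i in range(0, len(ma) - 2):
--         for j in range(0, len(ma[0]) - 2):
--             ad = 0
--             for h in range(0, 3):
--                 for k in range(0, 3):
--                     ad += (kernel[h][k] * ma[i + h][j + k])
--             rs += ad
--     return rs
-- ===== SOURCE B (Python) =====
-- def cn(ma, kernel):
--     rows = len(ma) - 2
--     if rows <= 0:
--         return 0
--     cols = len(ma[0]) - 2
--     if cols <= 0:
--         return 0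
--     rs = 0
--     for h in range(3):
--         for k in range(3):
--             s = 0
--             for i in range(rows):
--                 for j in range(cols):
--                     s += ma[i + h][j + k]
--             rs += kernel[h][k] * s
--     return rs
-- ===== Notes on version B (the rewrite author's own statement) =====
-- stated objective: alternative
-- what changed: Loop nesting is reversed: B iterates over the 9 kernel positions (h,k) in the outer loops, sums the whole shifted image once per position and scales that sum by kernel[h][k] once, with guard clauses returning 0 when no 3x3 window exists; A iterates over window origins and recomputes the full 3x3 dot product per window.
import Mathlib
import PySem

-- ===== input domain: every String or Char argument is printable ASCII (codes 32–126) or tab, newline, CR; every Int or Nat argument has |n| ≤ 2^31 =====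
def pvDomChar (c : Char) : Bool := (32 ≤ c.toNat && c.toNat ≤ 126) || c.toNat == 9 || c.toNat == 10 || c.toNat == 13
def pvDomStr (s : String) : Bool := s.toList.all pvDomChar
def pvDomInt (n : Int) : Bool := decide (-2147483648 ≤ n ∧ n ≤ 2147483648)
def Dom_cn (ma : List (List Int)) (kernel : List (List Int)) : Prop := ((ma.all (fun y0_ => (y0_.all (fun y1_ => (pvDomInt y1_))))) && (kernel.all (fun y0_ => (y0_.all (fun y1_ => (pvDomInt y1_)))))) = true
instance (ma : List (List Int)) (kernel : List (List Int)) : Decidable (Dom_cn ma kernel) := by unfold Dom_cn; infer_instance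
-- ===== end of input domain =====

-- B reverses A's loop nesting: the 3×3 kernel positions become the outer loops and each
-- full-image shifted sum is computed once, then scaled — same values, different decomposition.

-- ===== PORT A =====
-- all indices are in range under Pre_cn, so getD's default is never returned there
def cn (ma : List (List Int)) (kernel : List (List Int)) : Int :=
  (List.range (ma.length - 2)).foldl (fun rs i =>
    (List.range ((ma.headD []).length - 2)).foldl (fun rs j =>
      rs + ((List.range 3).foldl (fun ad h =>
        (List.range 3).foldl (fun ad k =>
          ad + (kernel.getD h []).getD k 0 * (ma.getD (i + h) []).getD (j + k) 0) ad) 0)) rs) 0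

-- ===== PORT B =====
def cn_alt (ma : List (List Int)) (kernel : List (List Int)) : Int :=
  if (ma.length : Int) - 2 ≤ 0 then 0
  else if (((ma.headD []).length : Int)) - 2 ≤ 0 then 0
  else
    (List.range 3).foldl (fun rs h =>
      (List.range 3).foldl (fun rs k =>
        rs + (kernel.getD h []).getD k 0 *
          ((List.range (ma.length - 2)).foldl (fun s i =>
            (List.range ((ma.headD []).length - 2)).foldl (fun s j =>
              s + (ma.getD (i + h) []).getD (j + k) 0) s) 0)) rs) 0

-- ===== PRECONDITION & SPEC =====
-- Pre_cn = exactly the inputs where Python A returns (no IndexError): whenever a 3×3 window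
-- exists, the kernel must have a full 3×3 corner and every row of ma must be at least as long
-- as row 0 (all accessed indices in range); otherwise the loops never index anything.
def Pre_cn (ma : List (List Int)) (kernel : List (List Int)) : Prop :=
  3 ≤ ma.length → 3 ≤ (ma.headD []).length →
    (3 ≤ kernel.length ∧ (∀ r ∈ kernel.take 3, 3 ≤ r.length) ∧
      (∀ r ∈ ma, (ma.headD []).length ≤ r.length))
instance (ma : List (List Int)) (kernel : List (List Int)) : Decidable (Pre_cn ma kernel) := by
  unfold Pre_cn; infer_instance

def pvWitness_cn : List (List Int) × List (List Int) :=
  ([[1, 2, 3], [4, 5, 6], [7, 8, 9]], [[1, 0, 0], [0, 1, 0], [0, 0, 1]])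

def Spec_cn (ma : List (List Int)) (kernel : List (List Int)) (out : Int) : Prop := out = cn_alt ma kernel
instance (ma : List (List Int)) (kernel : List (List Int)) (out : Int) : Decidable (Spec_cn ma kernel out) := by unfold Spec_cn; infer_instance

-- ===== CLAIM (what is proved, stated in full; the proofs are below) =====
def Claim_equal_cn : Prop := ∀ (ma : List (List Int)) (kernel : List (List Int)), Dom_cn ma kernel → Pre_cn ma kernel → Spec_cn ma kernel (cn ma kernel)

-- ===== LEMMAS AND PROOFS =====

-- fold-with-accumulator over range = sum over Finset.range
theorem pv_foldl_sum (n : Nat) (g : Nat → Int) (a : Int) :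
    (List.range n).foldl (fun acc x => acc + g x) a = a + ∑ x ∈ Finset.range n, g x := by
  rw [PySem.List.foldl_add]
  congr 1

theorem cn_eq_sum (ma kernel : List (List Int)) :
    cn ma kernel =
      ∑ i ∈ Finset.range (ma.length - 2), ∑ j ∈ Finset.range ((ma.headD []).length - 2),
        ∑ h ∈ Finset.range 3, ∑ k ∈ Finset.range 3,
          (kernel.getD h []).getD k 0 * (ma.getD (i + h) []).getD (j + k) 0 := by
  unfold cn
  simp only [pv_foldl_sum, zero_add]

theorem cn_alt_eq_sum (ma kernel : List (List Int))
    (h1 : ¬ ((ma.length : Int) - 2 ≤ 0)) (h2 : ¬ (((ma.headD []).length : Int) - 2 ≤ 0)) :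
    cn_alt ma kernel =
      ∑ h ∈ Finset.range 3, ∑ k ∈ Finset.range 3,
        ∑ i ∈ Finset.range (ma.length - 2), ∑ j ∈ Finset.range ((ma.headD []).length - 2),
          (kernel.getD h []).getD k 0 * (ma.getD (i + h) []).getD (j + k) 0 := by
  unfold cn_alt
  rw [if_neg h1, if_neg h2]
  simp only [pv_foldl_sum, zero_add]
  refine Finset.sum_congr rfl fun h _ => Finset.sum_congr rfl fun k _ => ?_
  rw [Finset.mul_sum]
  exact Finset.sum_congr rfl fun i _ => Finset.mul_sum _ _ _

-- ===== VERDICT (by name: the statement is the Claim_ definition above) =====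
theorem cn_spec : Claim_equal_cn := by
  intro ma kernel _ _
  unfold Spec_cn
  by_cases h1 : (ma.length : Int) - 2 ≤ 0
  · have hR : ma.length - 2 = 0 := by omega
    unfold cn cn_alt
    rw [if_pos h1, hR]
    simp
  · by_cases h2 : ((ma.headD []).length : Int) - 2 ≤ 0
    · have hC : (ma.headD []).length - 2 = 0 := by omega
      unfold cn cn_alt
      rw [if_neg h1, if_pos h2, hC]
      simp
    · rw [cn_eq_sum, cn_alt_eq_sum ma kernel h1 h2]
      calc
        (∑ i ∈ Finset.range (ma.length - 2), ∑ j ∈ Finset.range ((ma.headD []).length - 2),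
            ∑ h ∈ Finset.range 3, ∑ k ∈ Finset.range 3,
              (kernel.getD h []).getD k 0 * (ma.getD (i + h) []).getD (j + k) 0)
          = ∑ i ∈ Finset.range (ma.length - 2), ∑ h ∈ Finset.range 3,
              ∑ j ∈ Finset.range ((ma.headD []).length - 2), ∑ k ∈ Finset.range 3,
                (kernel.getD h []).getD k 0 * (ma.getD (i + h) []).getD (j + k) 0 :=
            Finset.sum_congr rfl fun i _ => Finset.sum_comm
        _ = ∑ h ∈ Finset.range 3, ∑ i ∈ Finset.range (ma.length - 2),
              ∑ j ∈ Finset.range ((ma.headD []).length - 2), ∑ k ∈ Finset.range 3,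
                (kernel.getD h []).getD k 0 * (ma.getD (i + h) []).getD (j + k) 0 :=
            Finset.sum_comm
        _ = ∑ h ∈ Finset.range 3, ∑ i ∈ Finset.range (ma.length - 2),
              ∑ k ∈ Finset.range 3, ∑ j ∈ Finset.range ((ma.headD []).length - 2),
                (kernel.getD h []).getD k 0 * (ma.getD (i + h) []).getD (j + k) 0 :=
            Finset.sum_congr rfl fun h _ => Finset.sum_congr rfl fun i _ => Finset.sum_comm
        _ = ∑ h ∈ Finset.range 3, ∑ k ∈ Finset.range 3,
              ∑ i ∈ Finset.range (ma.length - 2), ∑ j ∈ Finset.range ((ma.headD []).length - 2),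
                (kernel.getD h []).getD k 0 * (ma.getD (i + h) []).getD (j + k) 0 :=
            Finset.sum_congr rfl fun h _ => Finset.sum_comm
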